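-- pv_equiv track=rewrite | github.com/Caranouga/AdventOfCode-2024 | 01/part02/index.py | count
-- ===== SOURCE A (Python) =====
-- def count(data):
--     lst1, lst2 = data
--
--     total_sum = 0
--     for elt1 in lst1:
--         sum_ = 0
--         for elt2 in lst2:
--             if elt1 == elt2:
--                 sum_ += 1
--         total_sum += sum_ * elt1
--
--     return total_sum
-- ===== SOURCE B (Python) =====
-- def count(data):
--     lst1, lst2 = data
--     c1 = {}
--     for x in lst1:
--         c1[x] = c1.get(x, 0) + 1
--     c2 = {}
--     for x in lst2:
--         c2[x] = c2.get(x, 0) + 1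
--     total = 0
--     for v, c in c1.items():
--         total += v * c * c2.get(v, 0)
--     return total
-- ===== Notes on version B (the rewrite author's own statement) =====
-- stated objective: faster
-- what changed: Replaces the nested scan of lst2 for every element of lst1 by two frequency tables built in one pass each, then a single loop over the distinct values of lst1 accumulating v * count1(v) * count2(v).
import Mathlib
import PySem

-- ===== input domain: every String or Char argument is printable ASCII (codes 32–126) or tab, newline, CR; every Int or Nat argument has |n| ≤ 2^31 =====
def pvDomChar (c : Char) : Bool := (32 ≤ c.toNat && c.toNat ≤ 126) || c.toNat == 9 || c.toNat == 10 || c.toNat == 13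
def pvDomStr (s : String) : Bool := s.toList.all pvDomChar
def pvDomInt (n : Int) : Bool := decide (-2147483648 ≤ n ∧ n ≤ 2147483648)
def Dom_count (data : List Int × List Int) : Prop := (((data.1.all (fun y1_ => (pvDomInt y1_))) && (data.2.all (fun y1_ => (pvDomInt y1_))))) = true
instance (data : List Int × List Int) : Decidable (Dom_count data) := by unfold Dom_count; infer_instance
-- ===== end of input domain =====

-- B replaces A's quadratic nested scan by two one-pass frequency tables and a single
-- loop over lst1's distinct values (objective: faster, asymptotic O(n+m) vs O(n*m)).

-- ===== PORT A =====
def count (data : List Int × List Int) : Int :=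
  let lst1 := data.1
  let lst2 := data.2
  lst1.foldl (fun total_sum elt1 =>
    let sum_ : Int := lst2.foldl (fun s elt2 => if elt1 == elt2 then s + 1 else s) 0
    total_sum + sum_ * elt1) 0

-- ===== PORT B =====
def count_alt (data : List Int × List Int) : Int :=
  let lst1 := data.1
  let lst2 := data.2
  let c1 : PySem.Dict Int Int := lst1.foldl (fun d x => d.insert x (d.getD x 0 + 1)) PySem.Dict.empty
  let c2 : PySem.Dict Int Int := lst2.foldl (fun d x => d.insert x (d.getD x 0 + 1)) PySem.Dict.empty
  c1.items.foldl (fun total p => total + p.1 * p.2 * c2.getD p.1 0) 0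

-- ===== PRECONDITION & SPEC =====
def Spec_count (data : List Int × List Int) (out : Int) : Prop := out = count_alt data
instance (data : List Int × List Int) (out : Int) : Decidable (Spec_count data out) := by unfold Spec_count; infer_instance

-- ===== CLAIM (what is proved, stated in full; the proofs are below) =====
def Claim_equal_count : Prop := ∀ (data : List Int × List Int), Dom_count data → Spec_count data (count data)

-- ===== LEMMAS AND PROOFS =====

-- A's inner loop counts the occurrences of x in l
lemma inner_count (x : Int) (l : List Int) (a : Int) :
    l.foldl (fun s e => if x == e then s + 1 else s) a = a + (l.count x : Int) := by
  induction l generalizing a with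
  | nil => simp
  | cons h t ih =>
    simp only [List.foldl_cons, List.count_cons, ih]
    by_cases hx : x = h
    · simp [hx]
      ring
    · have : (h == x) = false := by simpa using fun he => hx he.symm
      simp [hx, Ne.symm hx, this]

lemma count_eq_sum (lst1 lst2 : List Int) :
    (lst1.foldl (fun total_sum elt1 =>
      total_sum + (lst2.foldl (fun s elt2 => if elt1 == elt2 then s + 1 else s) 0) * elt1) 0)
      = (lst1.map (fun x => (lst2.count x : Int) * x)).sum := by
  have h2 : (lst1.foldl (fun total_sum elt1 =>
      total_sum + (lst2.foldl (fun s elt2 => if elt1 == elt2 then s + 1 else s) 0) * elt1) 0)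
      = lst1.foldl (fun acc x => acc + (lst2.count x : Int) * x) 0 := by
    apply PySem.List.foldl_congr_mem
    intro acc x _
    rw [inner_count]
    simp
  rw [h2, PySem.List.foldl_add (g := fun x => (lst2.count x : Int) * x), zero_add]

lemma toFinset_ofList (l : List Int) : (PySem.Set.ofList l).toFinset = l.toFinset := by
  ext x
  simp [List.mem_toFinset, PySem.Set.mem_ofList]

lemma alt_eq_sum (lst1 lst2 : List Int) :
    count_alt (lst1, lst2)
      = ((PySem.Set.ofList lst1).map
          (fun v => v * (lst1.count v : Int) * (lst2.count v : Int))).sum := by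
  unfold count_alt
  simp only
  rw [PySem.Dict.foldl_insert_getD_add_one_eq_counter,
      PySem.Dict.foldl_insert_getD_add_one_eq_counter,
      PySem.Dict.items_counter]
  rw [PySem.List.foldl_add (g := fun p : Int × Int => p.1 * p.2 * ((PySem.Dict.counter lst2).getD p.1 0))]
  simp [PySem.Dict.getD_counter, Function.comp_def]

lemma main_identity (lst1 lst2 : List Int) :
    (lst1.map (fun x => (lst2.count x : Int) * x)).sum
      = ((PySem.Set.ofList lst1).map
          (fun v => v * (lst1.count v : Int) * (lst2.count v : Int))).sum := by
  rw [Finset.sum_list_map_count lst1 (fun x => (lst2.count x : Int) * x)]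
  rw [← List.sum_toFinset _ (PySem.Set.nodup_ofList lst1), toFinset_ofList]
  apply Finset.sum_congr rfl
  intro m _
  simp only [nsmul_eq_mul]
  ring

-- ===== VERDICT (by name: the statement is the Claim_ definition above) =====
theorem count_spec : Claim_equal_count := by
  intro data _
  unfold Spec_count count
  obtain ⟨lst1, lst2⟩ := data
  simp only
  rw [count_eq_sum, main_identity, ← alt_eq_sum]
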